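-- pv_equiv track=rewrite | github.com/jorzaiy/Threadloom | backend/state_keeper.py | _derive_risks_clues_from_signals
-- ===== SOURCE A (Python) =====
-- def _derive_risks_clues_from_signals(signals: list[dict]) -> tuple[list[str], list[str]]:
--     risks = []
--     clues = []
--     for item in signals or []:
--         if not isinstance(item, dict):
--             continue
--         signal_type = str(item.get('type', '') or 'mixed').strip() or 'mixed'
--         text = str(item.get('text', '') or '').strip()
--         if not text:
--             continue
--         if signal_type in {'risk', 'mixed'} and text not in risks:
--             risks.append(text)
--         if signal_type in {'clue', 'mixed'} and text not in clues:
--             clues.append(text)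
--     return risks[:4], clues[:4]
-- ===== SOURCE B (Python) =====
-- def _derive_risks_clues_from_signals(signals: list[dict]) -> tuple[list[str], list[str]]:
--     # Pass 1: normalize every signal into a (signal_type, text) pair, dropping invalid ones.
--     items = []
--     for item in signals or []:
--         if not isinstance(item, dict):
--             continue
--         signal_type = str(item.get('type', '') or 'mixed').strip() or 'mixed'
--         text = str(item.get('text', '') or '').strip()
--         if text:
--             items.append((signal_type, text))
--     # Pass 2/3: independent order-preserving dedup over each category, sliced after dedup.
--     risks = list(dict.fromkeys(t for st, t in items if st in ('risk', 'mixed')))[:4]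
--     clues = list(dict.fromkeys(t for st, t in items if st in ('clue', 'mixed')))[:4]
--     return risks, clues
-- ===== Notes on version B (the rewrite author's own statement) =====
-- stated objective: alternative
-- what changed: A's single interleaved loop that appends to risks and clues with in-list membership tests is replaced by one normalization pass producing (type, text) pairs followed by two independent filter + dict.fromkeys dedup passes, sliced to 4 after dedup.
import Mathlib
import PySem

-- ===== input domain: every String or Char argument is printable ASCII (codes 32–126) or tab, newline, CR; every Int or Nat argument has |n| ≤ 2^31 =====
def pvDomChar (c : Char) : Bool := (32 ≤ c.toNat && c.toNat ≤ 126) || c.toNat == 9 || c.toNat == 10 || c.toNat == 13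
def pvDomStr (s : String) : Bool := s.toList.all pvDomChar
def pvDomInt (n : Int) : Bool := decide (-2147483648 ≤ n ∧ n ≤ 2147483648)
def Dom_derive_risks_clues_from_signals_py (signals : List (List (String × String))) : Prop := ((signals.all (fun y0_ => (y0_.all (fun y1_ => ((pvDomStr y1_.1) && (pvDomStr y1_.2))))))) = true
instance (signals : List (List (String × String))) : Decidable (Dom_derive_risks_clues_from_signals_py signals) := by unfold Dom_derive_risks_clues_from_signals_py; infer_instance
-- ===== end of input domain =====

-- B replaces A's single interleaved membership-append loop by one normalization pass plus two
-- independent filter+dedup passes (alternative decomposition; same results, no speed claim proved).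

-- ===== PORT A =====
-- A's loop body: one step of the interleaved risks/clues accumulation.
def deriveStepA (acc : List String × List String) (item : List (String × String)) :
    List String × List String :=
  let st0 := PySem.Dict.getD (PySem.Dict.mk item) "type" ""
  let st1 := PySem.Str.strip (if st0 = "" then "mixed" else st0)
  let signal_type := if st1 = "" then "mixed" else st1
  let text := PySem.Str.strip (PySem.Dict.getD (PySem.Dict.mk item) "text" "")
  if text = "" then acc
  else
    let risks := if (signal_type = "risk" ∨ signal_type = "mixed") ∧ ¬ text ∈ acc.1
                 then acc.1 ++ [text] else acc.1
    let clues := if (signal_type = "clue" ∨ signal_type = "mixed") ∧ ¬ text ∈ acc.2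
                 then acc.2 ++ [text] else acc.2
    (risks, clues)

def derive_risks_clues_from_signals_py (signals : List (List (String × String))) :
    List String × List String :=
  let rc := signals.foldl deriveStepA ([], [])
  (rc.1.take 4, rc.2.take 4)

-- ===== PORT B =====
-- normalization of one signal: none = dropped (empty text), some (signal_type, text) otherwise
def normSignal (item : List (String × String)) : Option (String × String) :=
  let st0 := PySem.Dict.getD (PySem.Dict.mk item) "type" ""
  let st1 := PySem.Str.strip (if st0 = "" then "mixed" else st0)
  let signal_type := if st1 = "" then "mixed" else st1
  let text := PySem.Str.strip (PySem.Dict.getD (PySem.Dict.mk item) "text" "")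
  if text = "" then none else some (signal_type, text)

def derive_risks_clues_from_signals_py_alt (signals : List (List (String × String))) :
    List String × List String :=
  let items := signals.filterMap normSignal
  let risks := PySem.List.dedup ((items.filter (fun p => p.1 == "risk" || p.1 == "mixed")).map Prod.snd)
  let clues := PySem.List.dedup ((items.filter (fun p => p.1 == "clue" || p.1 == "mixed")).map Prod.snd)
  (risks.take 4, clues.take 4)

-- ===== PRECONDITION & SPEC =====
def Spec_derive_risks_clues_from_signals_py (signals : List (List (String × String))) (out : List String × List String) : Prop := out = derive_risks_clues_from_signals_py_alt signals
instance (signals : List (List (String × String))) (out : List String × List String) : Decidable (Spec_derive_risks_clues_from_signals_py signals out) := by unfold Spec_derive_risks_clues_from_signals_py; infer_instance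

-- ===== CLAIM (what is proved, stated in full; the proofs are below) =====
def Claim_equal_derive_risks_clues_from_signals_py : Prop := ∀ (signals : List (List (String × String))), Dom_derive_risks_clues_from_signals_py signals → Spec_derive_risks_clues_from_signals_py signals (derive_risks_clues_from_signals_py signals)

-- ===== LEMMAS AND PROOFS =====

-- A's step, rewritten through normSignal
theorem deriveStepA_normSignal (acc : List String × List String) (item : List (String × String)) :
    deriveStepA acc item =
      match normSignal item with
      | none => acc
      | some (st, t) =>
          ((if st = "risk" ∨ st = "mixed" then PySem.Set.add acc.1 t else acc.1),
           (if st = "clue" ∨ st = "mixed" then PySem.Set.add acc.2 t else acc.2)) := by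
  simp only [deriveStepA, normSignal, PySem.Set.add_eq_ite]
  split_ifs <;> simp_all

-- the interleaved fold splits into two independent Set.add folds over the filtered texts
theorem foldA_split (signals : List (List (String × String))) (r c : List String) :
    signals.foldl deriveStepA (r, c) =
      ((((signals.filterMap normSignal).filter (fun p => p.1 == "risk" || p.1 == "mixed")).map Prod.snd).foldl PySem.Set.add r,
       (((signals.filterMap normSignal).filter (fun p => p.1 == "clue" || p.1 == "mixed")).map Prod.snd).foldl PySem.Set.add c) := by
  induction signals generalizing r c with
  | nil => rfl
  | cons s rest ih =>
    simp only [List.foldl_cons, List.filterMap_cons, deriveStepA_normSignal]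
    cases h : normSignal s with
    | none => simp [ih]
    | some p =>
      obtain ⟨st, t⟩ := p
      by_cases hr : st = "risk" ∨ st = "mixed" <;> by_cases hc : st = "clue" ∨ st = "mixed" <;>
        simp [hr, hc, ih]

-- ===== VERDICT (by name: the statement is the Claim_ definition above) =====
theorem derive_risks_clues_from_signals_py_spec : Claim_equal_derive_risks_clues_from_signals_py := by
  intro signals _
  unfold Spec_derive_risks_clues_from_signals_py
  unfold derive_risks_clues_from_signals_py derive_risks_clues_from_signals_py_alt
  rw [foldA_split]
  simp [PySem.List.dedup_eq_ofList, PySem.Set.ofList_eq_foldl]
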